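-- pv_equiv track=rewrite | github.com/tigistzelalem/CompetitiveProgramming | A_Hulk.py | sentence
-- ===== SOURCE A (Python) =====
-- def sentence(n):
--         if n == 1:
--             return 'I hate it'
--         elif n == 2:
--             return 'I hate that I love it'
--         elif n == 3:
--             return 'I hate that I love that I hate it'
--         else:
--             if n % 2 == 0:
--                 return 'I hate that I love ' +  sentence(n-1)
--             else:
--                 return 'I hate that ' + sentence(n-1)
-- ===== SOURCE B (Python) =====
-- def sentence(n):
--     BASE = {1: 'I hate it', 2: 'I hate that I love it', 3: 'I hate that I love that I hate it'}
--     if n <= 3: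
--         return BASE[n]
--     out = ''
--     for k in range(n, 3, -1):
--         out += 'I hate that I love ' if k % 2 == 0 else 'I hate that '
--     return out + BASE[3]
-- ===== Notes on version B (the rewrite author's own statement) =====
-- stated objective: alternative
-- what changed: Replaces A's recursion (one stack frame per clause, peeling a clause prefix off the front each call) with a flat accumulator loop over range(n,3,-1) that appends each clause's text, plus a base-case dict; no recursion, constant stack depth.
import Mathlib
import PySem

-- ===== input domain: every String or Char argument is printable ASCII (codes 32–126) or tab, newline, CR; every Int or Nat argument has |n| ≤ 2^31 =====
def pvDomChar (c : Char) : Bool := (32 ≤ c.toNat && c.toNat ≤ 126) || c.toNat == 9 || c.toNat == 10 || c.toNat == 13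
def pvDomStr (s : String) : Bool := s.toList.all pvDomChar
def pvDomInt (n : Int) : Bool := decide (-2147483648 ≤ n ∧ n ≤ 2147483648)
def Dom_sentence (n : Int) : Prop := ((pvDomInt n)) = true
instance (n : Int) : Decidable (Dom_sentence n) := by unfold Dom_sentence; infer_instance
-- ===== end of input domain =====

-- B replaces A's recursion with a flat accumulator loop over range(n,3,-1); A = B for all n ≥ 1
-- (for n ≤ 0 Python A recurses forever — RecursionError — so those inputs are outside Pre_).

-- ===== PORT A =====
def sentence (n : Int) : String :=
  if n ≤ 0 then ""  -- totality guard only: Python's recursion never returns here (outside Pre_)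
  else if n = 1 then "I hate it"
  else if n = 2 then "I hate that I love it"
  else if n = 3 then "I hate that I love that I hate it"
  else if n % 2 = 0 then "I hate that I love " ++ sentence (n - 1)
  else "I hate that " ++ sentence (n - 1)
termination_by n.toNat
decreasing_by all_goals omega

-- ===== PORT B =====
-- BASE = {1: …, 2: …, 3: …}
def sentenceAltBase : PySem.Dict Int String :=
  PySem.Dict.ofList
    [((1 : Int), "I hate it"), (2, "I hate that I love it"), (3, "I hate that I love that I hate it")]

def sentence_alt (n : Int) : String :=
  if n ≤ 3 then (PySem.Dict.get? sentenceAltBase n).getD ""  -- none = KeyError (n ≤ 0): outside Pre_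
  else
    (PySem.List.pyRange n 3 (-1)).foldl
      (fun out k => out ++ (if k % 2 = 0 then "I hate that I love " else "I hate that ")) ""
    ++ (PySem.Dict.get? sentenceAltBase 3).getD ""

-- ===== PRECONDITION & SPEC =====
-- Pre_ excludes exactly n ≤ 0, where Python A raises RecursionError (unbounded recursion).
def Pre_sentence (n : Int) : Prop := 1 ≤ n
instance (n : Int) : Decidable (Pre_sentence n) := by unfold Pre_sentence; infer_instance
def pvWitness_sentence : Int := (5)

def Spec_sentence (n : Int) (out : String) : Prop := out = sentence_alt n
instance (n : Int) (out : String) : Decidable (Spec_sentence n out) := by unfold Spec_sentence; infer_instance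

-- ===== CLAIM (what is proved, stated in full; the proofs are below) =====
def Claim_equal_sentence : Prop := ∀ (n : Int), Dom_sentence n → Pre_sentence n → Spec_sentence n (sentence n)

-- ===== LEMMAS AND PROOFS =====

-- pull the initial accumulator out of B's append-loop
theorem sentence_foldl_out (g : Int → String) (l : List Int) (init : String) :
    l.foldl (fun a k => a ++ g k) init = init ++ l.foldl (fun a k => a ++ g k) "" := by
  induction l generalizing init with
  | nil => simp [List.foldl]
  | cons x xs ih =>
      simp only [List.foldl]
      rw [ih (init ++ g x), ih ("" ++ g x)]
      simp [String.append_assoc]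

-- one unfolding step of B for n ≥ 4
theorem sentence_alt_step (n : Int) (h : 3 < n) :
    sentence_alt n =
      (if n % 2 = 0 then "I hate that I love " else "I hate that ") ++ sentence_alt (n - 1) := by
  by_cases h4 : n = 4
  · subst h4
    simp [sentence_alt, sentenceAltBase, PySem.Dict.get?, PySem.Dict.ofList, PySem.Dict.update,
      PySem.Dict.empty, PySem.Dict.insert, PySem.Dict.contains, PySem.List.pyRange_neg_one]
  · have h5 : 3 < n - 1 := by omega
    conv_lhs => rw [sentence_alt, if_neg (show ¬ n ≤ 3 by omega), PySem.List.pyRange_neg_one_cons h]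
    conv_rhs => rw [sentence_alt, if_neg (show ¬ n - 1 ≤ 3 by omega)]
    simp only [List.foldl]
    rw [sentence_foldl_out]
    simp [String.append_assoc]

theorem sentence_main (k : Nat) : ∀ n : Int, 1 ≤ n → n ≤ (k : Int) → sentence n = sentence_alt n := by
  induction k with
  | zero => intro n h1 h2; omega
  | succ k ih =>
      intro n h1 h2
      by_cases h3 : n ≤ 3
      · interval_cases n <;>
          simp [sentence, sentence_alt, sentenceAltBase, PySem.Dict.get?, PySem.Dict.ofList,
            PySem.Dict.update, PySem.Dict.empty, PySem.Dict.insert, PySem.Dict.contains]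
      · have h3' : 3 < n := by omega
        rw [sentence, if_neg (by omega), if_neg (by omega), if_neg (by omega), if_neg (by omega)]
        rw [sentence_alt_step n h3', ih (n - 1) (by omega) (by omega)]
        by_cases hp : n % 2 = 0
        · rw [if_pos hp, if_pos hp]
        · rw [if_neg hp, if_neg hp]

-- ===== VERDICT (by name: the statement is the Claim_ definition above) =====
theorem sentence_spec : Claim_equal_sentence := by
  intro n _ hpre
  unfold Spec_sentence
  exact sentence_main n.toNat n hpre (by omega)
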